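-- pv_equiv track=rewrite | github.com/Etherum7/DSA | Arrays/maxMin.py | maxMin3
-- ===== SOURCE A (Python) =====
-- def maxMin3(arr):
--     # compare in pairs
--     n = len(arr)
--     if n % 2 == 0:
--         mx = max(arr[0], arr[1])
--         mn = min(arr[0], arr[1])
--         i = 2
--     else:
--         mx = mn = arr[0]
--         i = 1
--
--     while(i < n-1):
--         if(arr[i] < arr[i+1]):
--             mx = max(mx, arr[i+1])
--             mn = min(mn, arr[i])
--         else:
--             mx = max(mx, arr[i])
--             mn = min(mn, arr[i+1])
--         i+=2
--     return (mx, mn)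
-- ===== SOURCE B (Python) =====
-- def maxMin3(arr):
--     # plain one-element-at-a-time scan
--     mx = mn = arr[0]
--     for x in arr[1:]:
--         if x > mx:
--             mx = x
--         if x < mn:
--             mn = x
--     return (mx, mn)
-- ===== Notes on version B (the rewrite author's own statement) =====
-- stated objective: simpler
-- what changed: Replaced A's parity-based initialization and pairwise two-elements-per-iteration comparison loop with a plain single-element min/max scan starting from the first element.
import Mathlib
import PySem

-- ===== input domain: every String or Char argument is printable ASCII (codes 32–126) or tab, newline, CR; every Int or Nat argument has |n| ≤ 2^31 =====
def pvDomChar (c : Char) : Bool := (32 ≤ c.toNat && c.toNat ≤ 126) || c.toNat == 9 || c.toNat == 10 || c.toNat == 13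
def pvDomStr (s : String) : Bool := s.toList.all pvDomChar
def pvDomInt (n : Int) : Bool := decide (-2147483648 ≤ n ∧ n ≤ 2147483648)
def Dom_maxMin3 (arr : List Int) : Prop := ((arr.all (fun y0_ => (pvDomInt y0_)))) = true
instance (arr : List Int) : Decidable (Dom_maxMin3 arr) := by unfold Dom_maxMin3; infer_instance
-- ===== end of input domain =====

-- B changes the algorithm: a plain one-element-at-a-time min/max scan instead of A's
-- parity-based pairwise (two elements per iteration) comparison loop.

-- ===== PORT A =====
-- while(i < n-1): compare arr[i], arr[i+1] pairwise, advance by 2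
def maxMin3Loop (arr : List Int) (mx mn : Int) (i : Nat) : Int × Int :=
  if _h : i + 1 < arr.length then
    let a := PySem.List.pyGetD arr (i : Int) 0
    let b := PySem.List.pyGetD arr ((i : Int) + 1) 0
    if a < b then
      maxMin3Loop arr (max mx b) (min mn a) (i + 2)
    else
      maxMin3Loop arr (max mx a) (min mn b) (i + 2)
  else (mx, mn)
termination_by arr.length - i

def maxMin3 (arr : List Int) : Int × Int :=
  let n := arr.length
  if n % 2 = 0 then
    let a0 := PySem.List.pyGetD arr 0 0
    let a1 := PySem.List.pyGetD arr 1 0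
    maxMin3Loop arr (max a0 a1) (min a0 a1) 2
  else
    let a0 := PySem.List.pyGetD arr 0 0
    maxMin3Loop arr a0 a0 1

-- ===== PORT B =====
def maxMin3_alt (arr : List Int) : Int × Int :=
  let h0 := PySem.List.pyGetD arr 0 0
  (PySem.List.slice arr (some 1) none).foldl
    (fun p x => (if x > p.1 then x else p.1, if x < p.2 then x else p.2)) (h0, h0)

-- ===== PRECONDITION & SPEC =====
-- Python A raises IndexError on the empty list (indexing the first element); B does too.
def Pre_maxMin3 (arr : List Int) : Prop := arr ≠ []
instance (arr : List Int) : Decidable (Pre_maxMin3 arr) := by unfold Pre_maxMin3; infer_instance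
def pvWitness_maxMin3 : List Int := [3, -1, 4]

def Spec_maxMin3 (arr : List Int) (out : Int × Int) : Prop := out = maxMin3_alt arr
instance (arr : List Int) (out : Int × Int) : Decidable (Spec_maxMin3 arr out) := by unfold Spec_maxMin3; infer_instance

-- ===== CLAIM (what is proved, stated in full; the proofs are below) =====
def Claim_equal_maxMin3 : Prop := ∀ (arr : List Int), Dom_maxMin3 arr → Pre_maxMin3 arr → Spec_maxMin3 arr (maxMin3 arr)

-- ===== LEMMAS AND PROOFS =====

-- B's fold computes (foldl max, foldl min) componentwise
theorem fold_pair (l : List Int) (mx mn : Int) :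
    l.foldl (fun p x => (if x > p.1 then x else p.1, if x < p.2 then x else p.2)) (mx, mn)
      = (l.foldl max mx, l.foldl min mn) := by
  induction l generalizing mx mn with
  | nil => rfl
  | cons x xs ih =>
    simp only [List.foldl_cons, ih]
    congr 1 <;> congr 1 <;> omega

-- A's pairwise loop folds max/min over the remaining suffix, when that suffix has even length
theorem loop_inv (arr : List Int) (mx mn : Int) (i : Nat)
    (hpar : (arr.length - i) % 2 = 0) :
    maxMin3Loop arr mx mn i = ((arr.drop i).foldl max mx, (arr.drop i).foldl min mn) := by
  fun_induction maxMin3Loop arr mx mn i with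
  | case1 mx mn i h a b hab ih =>
    have hi : i < arr.length := by omega
    have hi1 : i + 1 < arr.length := h
    have ha : a = arr[i] := by
      show PySem.List.pyGetD arr (i : Int) 0 = _
      rw [PySem.List.pyGetD_natCast]
      simp [List.getD, List.getElem?_eq_getElem hi]
    have hb : b = arr[i+1] := by
      show PySem.List.pyGetD arr ((i : Int) + 1) 0 = _
      rw [show ((i : Int) + 1) = ((i + 1 : Nat) : Int) by push_cast; ring,
        PySem.List.pyGetD_natCast]
      simp [List.getD, List.getElem?_eq_getElem hi1]
    rw [ih (by omega)]
    rw [List.drop_eq_getElem_cons hi, List.drop_eq_getElem_cons hi1]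
    simp only [List.foldl_cons]
    rw [← ha, ← hb]
    simp only [Prod.mk.injEq]
    refine ⟨?_, ?_⟩ <;> congr 1 <;> omega
  | case2 mx mn i h a b hab ih =>
    have hi : i < arr.length := by omega
    have hi1 : i + 1 < arr.length := h
    have ha : a = arr[i] := by
      show PySem.List.pyGetD arr (i : Int) 0 = _
      rw [PySem.List.pyGetD_natCast]
      simp [List.getD, List.getElem?_eq_getElem hi]
    have hb : b = arr[i+1] := by
      show PySem.List.pyGetD arr ((i : Int) + 1) 0 = _
      rw [show ((i : Int) + 1) = ((i + 1 : Nat) : Int) by push_cast; ring,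
        PySem.List.pyGetD_natCast]
      simp [List.getD, List.getElem?_eq_getElem hi1]
    rw [ih (by omega)]
    rw [List.drop_eq_getElem_cons hi, List.drop_eq_getElem_cons hi1]
    simp only [List.foldl_cons]
    rw [← ha, ← hb]
    simp only [Prod.mk.injEq]
    refine ⟨?_, ?_⟩ <;> congr 1 <;> omega
  | case3 mx mn i h =>
    have : arr.length ≤ i := by omega
    rw [List.drop_eq_nil_of_le this]
    rfl

theorem alt_cons (a : Int) (rest : List Int) :
    maxMin3_alt (a :: rest) = (rest.foldl max a, rest.foldl min a) := by
  unfold maxMin3_alt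
  rw [PySem.List.slice_from_one]
  simp only [List.tail_cons, PySem.List.pyGetD_zero_cons]
  exact fold_pair rest a a

-- ===== VERDICT (by name: the statement is the Claim_ definition above) =====
theorem maxMin3_spec : Claim_equal_maxMin3 := by
  intro arr _ hpre
  unfold Spec_maxMin3
  match arr with
  | [] => exact absurd rfl hpre
  | a :: rest =>
    rw [alt_cons]
    unfold maxMin3
    by_cases hpar : (a :: rest).length % 2 = 0
    · -- even length: rest = b :: rest'
      match rest with
      | [] => simp at hpar
      | b :: rest' =>
        simp only [hpar, if_pos]
        have h0 : PySem.List.pyGetD (a :: b :: rest') 0 0 = a :=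
          PySem.List.pyGetD_zero_cons a (b :: rest') 0
        have h1 : PySem.List.pyGetD (a :: b :: rest') 1 0 = b := by
          simp [PySem.List.pyGetD_ofNat']
        rw [h0, h1, loop_inv _ _ _ 2 (by simp at hpar ⊢; omega)]
        simp only [List.drop_succ_cons, List.drop_zero, List.foldl_cons]
    · simp only [hpar, if_neg, not_false_iff]
      rw [PySem.List.pyGetD_zero_cons, loop_inv _ _ _ 1 (by simp at hpar ⊢; omega)]
      simp only [List.drop_succ_cons, List.drop_zero]
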